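-- pv_equiv track=rewrite | github.com/juliahuergoucm/c2526-R5 | src/eventos/eventos_actual_final.py | fusionar_lista_estaciones
-- ===== SOURCE A (Python) =====
-- from collections import defaultdict
--
-- def fusionar_lista_estaciones(lista_tuplas):
--     """Fusiona líneas con el mismo nombre de estación."""
--     if not isinstance(lista_tuplas, list):
--         return lista_tuplas
--
--     estaciones_fusionadas = defaultdict(set)
--     for nombre, lineas in lista_tuplas:
--         estaciones_fusionadas[nombre].update(lineas.split())
--
--     return [
--         (nombre, " ".join(sorted(lineas_set)))
--         for nombre, lineas_set in estaciones_fusionadas.items()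
--     ]
-- ===== SOURCE B (Python) =====
-- def fusionar_lista_estaciones(lista_tuplas):
--     """Fusiona líneas con el mismo nombre de estación."""
--     if not isinstance(lista_tuplas, list):
--         return lista_tuplas
--
--     nombres = []
--     for nombre, _ in lista_tuplas:
--         if nombre not in nombres:
--             nombres.append(nombre)
--
--     resultado = []
--     for objetivo in nombres:
--         lineas_set = set()
--         for nombre, lineas in lista_tuplas:
--             if nombre == objetivo:
--                 lineas_set.update(lineas.split())
--         resultado.append((objetivo, " ".join(sorted(lineas_set))))
--     return resultado
-- ===== Notes on version B (the rewrite author's own statement) =====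
-- stated objective: alternative
-- what changed: Replaces the single defaultdict(set) grouping pass with a first-appearance name-index pass followed by one full rescan per unique name that accumulates that name's tokens into a set.
import Mathlib
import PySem

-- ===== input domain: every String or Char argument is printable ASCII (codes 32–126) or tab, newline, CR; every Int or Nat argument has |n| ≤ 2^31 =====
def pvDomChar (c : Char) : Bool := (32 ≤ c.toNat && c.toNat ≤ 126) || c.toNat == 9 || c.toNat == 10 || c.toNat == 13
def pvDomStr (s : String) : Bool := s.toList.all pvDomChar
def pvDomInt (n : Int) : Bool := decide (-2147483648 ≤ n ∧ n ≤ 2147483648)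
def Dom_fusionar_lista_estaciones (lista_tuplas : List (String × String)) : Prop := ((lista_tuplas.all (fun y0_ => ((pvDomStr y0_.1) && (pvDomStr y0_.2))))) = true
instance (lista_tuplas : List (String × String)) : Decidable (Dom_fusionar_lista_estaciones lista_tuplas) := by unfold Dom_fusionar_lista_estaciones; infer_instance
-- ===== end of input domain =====

-- B replaces A's single dict-grouping pass by a unique-name index pass plus one rescan per name (alternative decomposition, same result).


-- ===== PORT A =====
-- defaultdict(set): d[nombre].update(lineas.split()) = modify with default empty set
def fusionar_lista_estaciones (lista_tuplas : List (String × String)) : List (String × String) :=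
  let estaciones_fusionadas :=
    lista_tuplas.foldl
      (fun d p => d.modify p.1 PySem.Set.empty (fun s => PySem.Set.update s (PySem.Str.split₀ p.2)))
      (PySem.Dict.empty : PySem.Dict String (PySem.Set String))
  estaciones_fusionadas.items.map
    (fun p => (p.1, PySem.Str.join " " (PySem.List.sorted p.2 (fun x => x) false)))

-- ===== PORT B =====
-- inner rescan of B: the set of tokens of all tuples whose name equals objetivo
def pvCollect (lista_tuplas : List (String × String)) (objetivo : String) : PySem.Set String :=
  lista_tuplas.foldl
    (fun s p => if p.1 = objetivo then PySem.Set.update s (PySem.Str.split₀ p.2) else s)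
    PySem.Set.empty

def fusionar_lista_estaciones_alt (lista_tuplas : List (String × String)) : List (String × String) :=
  let nombres := lista_tuplas.foldl (fun acc p => if p.1 ∈ acc then acc else acc ++ [p.1]) []
  nombres.map (fun objetivo =>
    (objetivo, PySem.Str.join " " (PySem.List.sorted (pvCollect lista_tuplas objetivo) (fun x => x) false)))

-- ===== PRECONDITION & SPEC =====
def Spec_fusionar_lista_estaciones (lista_tuplas : List (String × String)) (out : List (String × String)) : Prop := out = fusionar_lista_estaciones_alt lista_tuplas
instance (lista_tuplas : List (String × String)) (out : List (String × String)) : Decidable (Spec_fusionar_lista_estaciones lista_tuplas out) := by unfold Spec_fusionar_lista_estaciones; infer_instance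

-- ===== CLAIM (what is proved, stated in full; the proofs are below) =====
def Claim_equal_fusionar_lista_estaciones : Prop := ∀ (lista_tuplas : List (String × String)), Dom_fusionar_lista_estaciones lista_tuplas → Spec_fusionar_lista_estaciones lista_tuplas (fusionar_lista_estaciones lista_tuplas)

-- ===== LEMMAS AND PROOFS =====

-- the dict's entry for n is exactly B's per-name accumulation over the whole list
theorem pv_getD_fold (l : List (String × String)) :
    ∀ (d : PySem.Dict String (PySem.Set String)) (n : String),
    (l.foldl (fun d p => d.modify p.1 PySem.Set.empty (fun s => PySem.Set.update s (PySem.Str.split₀ p.2))) d).getD n PySem.Set.empty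
      = l.foldl (fun s p => if p.1 = n then PySem.Set.update s (PySem.Str.split₀ p.2) else s) (d.getD n PySem.Set.empty) := by
  induction l with
  | nil => intro d n; rfl
  | cons a t ih =>
    intro d n
    simp only [List.foldl_cons, ih]
    rw [PySem.Dict.getD_modify]
    by_cases h : a.1 = n
    · simp [h]
    · simp [h, Ne.symm h]

-- B's first-appearance name accumulator is Set.add folded over the names
theorem pv_nombres_eq (l : List (String × String)) :
    l.foldl (fun acc p => if p.1 ∈ acc then acc else acc ++ [p.1]) ([] : List String)
      = PySem.Set.ofList (l.map Prod.fst) := by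
  rw [PySem.Set.ofList_eq_foldl, List.foldl_map]
  congr 1
  funext acc x
  simp [PySem.Set.add, PySem.Set.contains]

-- ===== VERDICT (by name: the statement is the Claim_ definition above) =====
theorem fusionar_lista_estaciones_spec : Claim_equal_fusionar_lista_estaciones := by
  intro l _
  unfold Spec_fusionar_lista_estaciones fusionar_lista_estaciones fusionar_lista_estaciones_alt
  simp only []
  rw [PySem.Dict.items_eq_map_keys _
        (PySem.Dict.nodup_keys_foldl_modify_key l Prod.fst PySem.Set.empty
          (fun _ p => fun s => PySem.Set.update s (PySem.Str.split₀ p.2)) _ PySem.Dict.nodup_keys_empty)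
        PySem.Set.empty,
      PySem.Dict.keys_foldl_modify_key, List.map_map, pv_nombres_eq]
  simp only [PySem.Dict.keys_empty]
  have hupd : PySem.Set.update ([] : List String) (l.map Prod.fst) = PySem.Set.ofList (l.map Prod.fst) := by
    rw [PySem.Set.ofList_eq_foldl]; rfl
  rw [hupd]
  apply List.map_congr_left
  intro k _
  simp only [Function.comp]
  rw [pv_getD_fold, PySem.Dict.getD_empty]
  rfl
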